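-- pv_equiv track=rewrite | github.com/klyiiv/python__terminal_programms | kaspersky_2.py | can_form_kaspersky
-- ===== SOURCE A (Python) =====
-- def count_letters(word):
--     letter_count = {}
--
--     for letter in word:
--         if letter in letter_count:
--             letter_count[letter] += 1
--         else:
--             letter_count[letter] = 1
--
--     return letter_count
--
-- def can_form_kaspersky(word):
--     kaspersky = "kaspersky"
--     kaspersky_count = count_letters(kaspersky)
--     word_count = count_letters(word)
--
--     can_form = True
--     for letter in kaspersky_count:
--         if letter not in word_count or word_count[letter] < kaspersky_count[letter]:
--             can_form = False
--             break
--
--     return can_form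
-- ===== SOURCE B (Python) =====
-- def can_form_kaspersky(word):
--     need = {'k': 2, 'a': 1, 's': 2, 'p': 1, 'e': 1, 'r': 1, 'y': 1}
--     missing = 9
--     for ch in word:
--         n = need.get(ch, 0)
--         if n:
--             need[ch] = n - 1
--             missing -= 1
--             if missing == 0:
--                 return True
--     return False
-- ===== Notes on version B (the rewrite author's own statement) =====
-- stated objective: alternative
-- what changed: A builds frequency tables of both strings and compares them; B never counts the word: it walks the word once, decrementing a remaining-need table of the 9 target letters, and returns True the moment all needs are satisfied (early exit) or False at the end.
import Mathlib
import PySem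

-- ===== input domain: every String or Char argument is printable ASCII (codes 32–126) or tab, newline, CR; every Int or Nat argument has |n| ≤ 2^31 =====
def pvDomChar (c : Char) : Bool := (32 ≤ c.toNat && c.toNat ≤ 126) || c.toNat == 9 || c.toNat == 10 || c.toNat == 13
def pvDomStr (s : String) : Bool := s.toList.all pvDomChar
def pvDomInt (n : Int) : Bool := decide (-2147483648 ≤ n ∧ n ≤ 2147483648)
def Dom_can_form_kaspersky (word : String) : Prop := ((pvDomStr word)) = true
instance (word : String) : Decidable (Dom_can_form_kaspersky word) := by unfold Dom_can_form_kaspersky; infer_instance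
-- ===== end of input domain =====

-- B drops A's two frequency tables: it scans the word once, decrementing a
-- remaining-need table of the target's letters and succeeding as soon as the
-- need is exhausted (objective: alternative single-pass/early-exit algorithm).

-- ===== PORT A =====
def count_letters (word : String) : PySem.Dict Char Int :=
  word.toList.foldl
    (fun letter_count letter =>
      if letter_count.contains letter then letter_count.modify letter 0 (· + 1)
      else letter_count.insert letter 1)
    PySem.Dict.empty

def can_form_kaspersky (word : String) : Bool :=
  let kaspersky := "kaspersky"
  let kaspersky_count := count_letters kaspersky
  let word_count := count_letters word
  -- 'word_count[letter]' is only evaluated when 'letter in word_count' (short-circuit 'or'),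
  -- so getD with default 0 is exact here
  kaspersky_count.keys.foldl
    (fun can_form letter =>
      if can_form then
        if !word_count.contains letter
            || decide (word_count.getD letter 0 < kaspersky_count.getD letter 0)
        then false else true
      else can_form)
    true

-- ===== PORT B =====
-- the literal dict {'k': 2, 'a': 1, 's': 2, 'p': 1, 'e': 1, 'r': 1, 'y': 1}
def cfkNeed0 : PySem.Dict Char Int :=
  PySem.Dict.ofList [('k', 2), ('a', 1), ('s', 2), ('p', 1), ('e', 1), ('r', 1), ('y', 1)]

-- the for-loop with its two early exits (return True / fall through to return False)
def cfkGo (need : PySem.Dict Char Int) (missing : Int) : List Char → Bool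
  | [] => false
  | ch :: rest =>
    let n := need.getD ch 0
    if n ≠ 0 then
      if missing - 1 = 0 then true
      else cfkGo (need.insert ch (n - 1)) (missing - 1) rest
    else cfkGo need missing rest

def can_form_kaspersky_alt (word : String) : Bool :=
  cfkGo cfkNeed0 9 word.toList

-- ===== PRECONDITION & SPEC =====
def Spec_can_form_kaspersky (word : String) (out : Bool) : Prop := out = can_form_kaspersky_alt word
instance (word : String) (out : Bool) : Decidable (Spec_can_form_kaspersky word out) := by unfold Spec_can_form_kaspersky; infer_instance

-- ===== CLAIM (what is proved, stated in full; the proofs are below) =====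
def Claim_equal_can_form_kaspersky : Prop := ∀ (word : String), Dom_can_form_kaspersky word → Spec_can_form_kaspersky word (can_form_kaspersky word)

-- ===== LEMMAS AND PROOFS =====

-- the distinct letters of "kaspersky", in first-occurrence order
def cfkK : List Char := ['k', 'a', 's', 'p', 'e', 'r', 'y']

-- the common characterisation both ports are proved equal to
def cfkSpec (word : String) : Bool :=
  cfkK.all (fun c => decide (cfkNeed0.getD c 0 ≤ (word.toList.count c : Int)))

lemma cl_getD (c : Char) : ∀ (l : List Char) (d : PySem.Dict Char Int),
    (l.foldl
      (fun lc letter =>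
        if lc.contains letter then lc.modify letter 0 (· + 1)
        else lc.insert letter 1) d).getD c 0 = d.getD c 0 + l.count c := by
  intro l
  induction l with
  | nil => intro d; simp
  | cons x t ih =>
    intro d
    simp only [List.foldl_cons]
    rw [ih]
    by_cases hx : d.contains x
    · simp only [hx, if_true]
      rw [PySem.Dict.getD_modify]
      by_cases hc : c = x
      · subst hc; simp [eq_comm]; omega
      · simp only [hc, if_false, List.count_cons]
        have : ¬ x = c := fun h => hc h.symm
        simp [this]
    · simp only [hx, if_false, Bool.false_eq_true]
      rw [PySem.Dict.getD_insert]
      by_cases hc : c = x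
      · subst hc
        have h0 : d.getD c 0 = 0 := PySem.Dict.getD_of_not_contains _ _ (by simpa using hx)
        simp [h0]
        omega
      · simp only [hc, if_false, List.count_cons]
        have : ¬ x = c := fun h => hc h.symm
        simp [this]

lemma cl_contains (c : Char) : ∀ (l : List Char) (d : PySem.Dict Char Int),
    (l.foldl
      (fun lc letter =>
        if lc.contains letter then lc.modify letter 0 (· + 1)
        else lc.insert letter 1) d).contains c = (d.contains c || l.contains c) := by
  intro l
  induction l with
  | nil => intro d; simp
  | cons x t ih =>
    intro d
    simp only [List.foldl_cons]
    rw [ih]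
    by_cases hx : d.contains x
    · by_cases hc : c = x
      · subst hc; simp [hx, PySem.Dict.contains_modify]
      · have hbe : (c == x) = false := by simp [hc]
        simp [hx, PySem.Dict.contains_modify, hc, hbe]
    · by_cases hc : c = x
      · subst hc; simp [hx]
      · have hbe : (c == x) = false := by simp [hc]
        simp [hx, hc, hbe, PySem.Dict.contains_insert]

lemma fold_step (L : List Char) (cond pred : Char → Bool) (h : ∀ c ∈ L, pred c = !cond c) :
    ∀ b : Bool, L.foldl (fun can c => if can then (if cond c then false else true) else can) b
      = (b && L.all pred) := by
  induction L with
  | nil => intro b; simp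
  | cons x t ih =>
    intro b
    have hx := h x (by simp)
    simp only [List.foldl_cons, List.all_cons]
    rw [ih (fun c hc => h c (by simp [hc]))]
    cases b <;> cases hcx : cond x <;> simp [hx, hcx]

lemma letter_eq (word : String) (c : Char) (req : Nat) (h1 : 1 ≤ req)
    (hA : (count_letters "kaspersky").getD c 0 = (req : Int))
    (hB : cfkNeed0.getD c 0 = (req : Int))
    (hg : (count_letters word).getD c 0 = ((word.toList.count c : Nat) : Int))
    (hc : (count_letters word).contains c = word.toList.contains c) :
    (decide (cfkNeed0.getD c 0 ≤ (word.toList.count c : Int)))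
      = !(!((count_letters word).contains c)
          || decide ((count_letters word).getD c 0 < (count_letters "kaspersky").getD c 0)) := by
  rw [hA, hB, hg, hc]
  by_cases h : (req : Int) ≤ word.toList.count c
  · have h2 : ¬(((word.toList.count c : Nat) : Int) < (req : Int)) := by omega
    simp [h, h2]
    exact List.count_pos_iff.mp (by omega)
  · have h2 : (((word.toList.count c : Nat) : Int) < (req : Int)) := by omega
    simp [h, h2]

-- A equals the characterisation
lemma a_eq_spec (word : String) : can_form_kaspersky word = cfkSpec word := by
  unfold can_form_kaspersky cfkSpec
  dsimp only
  have hkeys : (count_letters "kaspersky").keys = cfkK := by decide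
  rw [hkeys]
  rw [fold_step cfkK
        (fun letter => !(count_letters word).contains letter
          || decide ((count_letters word).getD letter 0 < (count_letters "kaspersky").getD letter 0))
        (fun letter => decide (cfkNeed0.getD letter 0 ≤ (word.toList.count letter : Int)))
        ?_ true]
  · simp
  · intro c hcm
    have hg : (count_letters word).getD c 0 = ((word.toList.count c : Nat) : Int) := by
      unfold count_letters; rw [cl_getD]; simp
    have hcn : (count_letters word).contains c = word.toList.contains c := by
      unfold count_letters; rw [cl_contains]; simp
    fin_cases hcm
    · exact letter_eq word 'k' 2 (by norm_num) (by decide) (by decide) hg hcn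
    · exact letter_eq word 'a' 1 (by norm_num) (by decide) (by decide) hg hcn
    · exact letter_eq word 's' 2 (by norm_num) (by decide) (by decide) hg hcn
    · exact letter_eq word 'p' 1 (by norm_num) (by decide) (by decide) hg hcn
    · exact letter_eq word 'e' 1 (by norm_num) (by decide) (by decide) hg hcn
    · exact letter_eq word 'r' 1 (by norm_num) (by decide) (by decide) hg hcn
    · exact letter_eq word 'y' 1 (by norm_num) (by decide) (by decide) hg hcn

lemma all_congr' (L : List Char) (f g : Char → Bool) (h : ∀ c ∈ L, f c = g c) :
    L.all f = L.all g := by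
  induction L with
  | nil => rfl
  | cons x t ih => simp only [List.all_cons]; rw [h x (by simp), ih (fun c hc => h c (by simp [hc]))]

-- the single-pass loop of B computes the characterisation, by this invariant:
-- missing is the sum of the remaining needs over cfkK, needs outside cfkK are 0
lemma cfkGo_spec : ∀ (l : List Char) (need : PySem.Dict Char Int),
    (∀ c, c ∉ cfkK → need.getD c 0 = 0) →
    (∀ c, 0 ≤ need.getD c 0) →
    0 < ∑ c ∈ cfkK.toFinset, need.getD c 0 →
    cfkGo need (∑ c ∈ cfkK.toFinset, need.getD c 0) l
      = cfkK.all (fun c => decide (need.getD c 0 ≤ (l.count c : Int))) := by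
  intro l
  induction l with
  | nil =>
    intro need h0 hnn hpos
    obtain ⟨c, hcK, hc⟩ : ∃ c ∈ cfkK.toFinset, 0 < need.getD c 0 := by
      by_contra h
      rw [not_exists] at h
      simp only [not_and, not_lt] at h
      have : ∑ c ∈ cfkK.toFinset, need.getD c 0 ≤ 0 :=
        Finset.sum_nonpos (fun c hcm => h c hcm)
      omega
    simp only [cfkGo]
    symm
    rw [List.all_eq_false]
    exact ⟨c, List.mem_toFinset.mp hcK, by simp [List.count_nil]; omega⟩
  | cons x rest ih =>
    intro need h0 hnn hpos
    rw [cfkGo]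
    by_cases hx : need.getD x 0 = 0
    · simp only [hx, ne_eq, not_true_eq_false, if_false]
      rw [ih need h0 hnn hpos]
      apply all_congr'
      intro c hcm
      by_cases hcx : c = x
      · subst hcx
        have h1 : (decide (need.getD c 0 ≤ ((c :: rest).count c : Int))) = true := by
          simp only [hx, decide_eq_true_eq]; omega
        have h2 : (decide (need.getD c 0 ≤ (rest.count c : Int))) = true := by
          simp only [hx, decide_eq_true_eq]; omega
        rw [h1, h2]
      · have hxc : ¬ x = c := fun h => hcx (Eq.symm h)
        have : (x :: rest).count c = rest.count c := by
          rw [List.count_cons]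
          simp [hxc]
        rw [this]
    · have hxK : x ∈ cfkK := by
        by_contra hK
        exact hx (h0 x hK)
      have hxpos : 0 < need.getD x 0 := lt_of_le_of_ne (hnn x) (fun h => hx h.symm)
      simp only [hx, ne_eq, not_false_eq_true, if_true]
      -- sum splits at x
      have hsplit : ∑ c ∈ cfkK.toFinset, need.getD c 0
          = need.getD x 0 + ∑ c ∈ cfkK.toFinset.erase x, need.getD c 0 :=
        (Finset.add_sum_erase _ _ (List.mem_toFinset.mpr hxK)).symm
      have herase_nn : 0 ≤ ∑ c ∈ cfkK.toFinset.erase x, need.getD c 0 :=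
        Finset.sum_nonneg (fun c _ => hnn c)
      by_cases hdone : (∑ c ∈ cfkK.toFinset, need.getD c 0) - 1 = 0
      · simp only [hdone, if_true]
        -- sum = 1, so need x = 1 and all other needs are 0
        have hx1 : need.getD x 0 = 1 := by omega
        have hrest0 : ∀ c ∈ cfkK.toFinset.erase x, need.getD c 0 = 0 := by
          have hsum0 : ∑ c ∈ cfkK.toFinset.erase x, need.getD c 0 = 0 := by omega
          intro c hcm
          have hle := Finset.single_le_sum (f := fun c => need.getD c 0)
            (fun c _ => hnn c) hcm
          dsimp only at hle
          have := hnn c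
          omega
        symm
        simp only [List.all_eq_true]
        intro c hcm
        by_cases hcx : c = x
        · subst hcx
          rw [hx1, List.count_cons_self]
          simp only [decide_eq_true_eq]
          omega
        · have : need.getD c 0 = 0 :=
            hrest0 c (Finset.mem_erase.mpr ⟨hcx, List.mem_toFinset.mpr hcm⟩)
          rw [this]
          simp only [decide_eq_true_eq]
          omega
      · simp only [hdone, if_false]
        -- recurse with the decremented need
        set need' := need.insert x (need.getD x 0 - 1) with hneed'
        have hget' : ∀ c, need'.getD c 0 = if c = x then need.getD x 0 - 1 else need.getD c 0 := by
          intro c; rw [hneed', PySem.Dict.getD_insert]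
        have hsum' : ∑ c ∈ cfkK.toFinset, need'.getD c 0
            = (∑ c ∈ cfkK.toFinset, need.getD c 0) - 1 := by
          have hs' : ∑ c ∈ cfkK.toFinset, need'.getD c 0
              = need'.getD x 0 + ∑ c ∈ cfkK.toFinset.erase x, need'.getD c 0 :=
            (Finset.add_sum_erase _ _ (List.mem_toFinset.mpr hxK)).symm
          have he : ∑ c ∈ cfkK.toFinset.erase x, need'.getD c 0
              = ∑ c ∈ cfkK.toFinset.erase x, need.getD c 0 := by
            apply Finset.sum_congr rfl
            intro c hcm
            rw [hget']
            simp [(Finset.mem_erase.mp hcm).1]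
          rw [hs', he, hget']
          rw [if_pos rfl]
          omega
        have hrec := ih need'
          (fun c hcK => by
            rw [hget']
            have hcx : ¬ c = x := fun h => hcK (h ▸ hxK)
            simp [hcx, h0 c hcK])
          (fun c => by
            rw [hget']
            by_cases hcx : c = x
            · simp [hcx]; omega
            · simp [hcx]; exact hnn c)
          (by rw [hsum']; omega)
        rw [hsum'] at hrec
        rw [hrec]
        apply all_congr'
        intro c hcm
        rw [hget']
        by_cases hcx : c = x
        · subst hcx
          rw [List.count_cons_self]
          rw [if_pos rfl]
          have : ((rest.count c + 1 : Nat) : Int) = (rest.count c : Int) + 1 := by push_cast; ring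
          rw [this]
          rw [decide_eq_decide]
          omega
        · have hxc : ¬ x = c := fun h => hcx (Eq.symm h)
          have : (x :: rest).count c = rest.count c := by
            rw [List.count_cons]
            simp [hxc]
          rw [this]
          simp [hcx]

-- B equals the characterisation
lemma b_eq_spec (word : String) : can_form_kaspersky_alt word = cfkSpec word := by
  unfold can_form_kaspersky_alt cfkSpec
  have h9 : (9 : Int) = ∑ c ∈ cfkK.toFinset, cfkNeed0.getD c 0 := by decide
  rw [h9]
  have hkeys : cfkNeed0.keys = cfkK := by decide
  exact cfkGo_spec word.toList cfkNeed0
    (fun c hcK => by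
      apply PySem.Dict.getD_of_not_contains
      rw [PySem.Dict.contains_eq_decide_mem_keys, hkeys]
      simpa using hcK)
    (fun c => by
      by_cases hcK : c ∈ cfkK
      · fin_cases hcK <;> decide
      · have hz : cfkNeed0.contains c = false := by
          rw [PySem.Dict.contains_eq_decide_mem_keys, hkeys]
          simpa using hcK
        rw [PySem.Dict.getD_of_not_contains _ _ hz])
    (by decide)

-- ===== VERDICT (by name: the statement is the Claim_ definition above) =====
theorem can_form_kaspersky_spec : Claim_equal_can_form_kaspersky := by
  intro word _
  unfold Spec_can_form_kaspersky
  rw [a_eq_spec, b_eq_spec]
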